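-- pv_equiv track=rewrite | github.com/RicKinG3/python_labs_1_sem | labs/lab_8/p.py | under_zero_min_max_strings_swap
-- ===== SOURCE A (Python) =====
-- def under_zero_min_max_strings_swap(arr) -> list:
--     max = sum(k for k in arr[0] if k < 0)
--     max_index = 0
--     min = sum(k for k in arr[0] if k < 0)
--     min_index = 0
--     for i, v in enumerate(arr):
--         new = sum(k for k in v if k < 0)
--         if new > max:
--             max = new
--             max_index = i
--         if new < min:
--             min = new
--             min_index = i
--     arr[max_index], arr[min_index] = arr[min_index], arr[max_index]
--     return arr
-- ===== SOURCE B (Python) =====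
-- def under_zero_min_max_strings_swap(arr) -> list:
--     sums = [sum(k for k in v if k < 0) for v in arr]
--     max_index = sums.index(max(sums))
--     min_index = sums.index(min(sums))
--     arr[max_index], arr[min_index] = arr[min_index], arr[max_index]
--     return arr
-- ===== Notes on version B (the rewrite author's own statement) =====
-- stated objective: simpler
-- what changed: Replaces A's single interleaved min/max-tracking loop (four running state variables) with a materialized table of negative-sums followed by built-in max/min and index lookups, which reproduce A's earliest-index tie-breaking.
import Mathlib
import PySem

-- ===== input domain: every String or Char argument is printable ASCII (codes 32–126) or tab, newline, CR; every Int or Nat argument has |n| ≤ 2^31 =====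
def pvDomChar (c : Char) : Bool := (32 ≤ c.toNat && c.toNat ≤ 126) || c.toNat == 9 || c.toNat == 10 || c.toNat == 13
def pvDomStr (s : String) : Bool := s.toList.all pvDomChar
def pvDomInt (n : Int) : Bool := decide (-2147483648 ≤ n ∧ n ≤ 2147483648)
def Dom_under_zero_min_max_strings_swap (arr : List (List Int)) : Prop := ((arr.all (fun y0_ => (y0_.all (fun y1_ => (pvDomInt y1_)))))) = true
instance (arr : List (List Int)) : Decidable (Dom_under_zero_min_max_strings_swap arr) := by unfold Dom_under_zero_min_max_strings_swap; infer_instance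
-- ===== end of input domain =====

-- B replaces A's interleaved four-variable min/max tracking loop by a materialized
-- table of negative-sums plus built-in max/min and first-index lookups (objective:
-- simpler). Both Pythons mutate `arr` in place (the swap); the equivalence proved
-- here is about the returned value.

-- ===== PORT A =====
-- shared helper: sum(k for k in v if k < 0)  (identical expression in both Pythons)
def pvSumNeg (v : List Int) : Int := (List.filter (fun k => decide (k < 0)) v).sum

-- shared helper: the identical swap line `arr[mxi], arr[mni] = arr[mni], arr[mxi]`
-- of both Pythons (RHS tuple read first, then the two assignments)
def pvSwap (arr : List (List Int)) (mxi mni : Int) : List (List Int) :=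
  match PySem.List.pyGet? arr mni, PySem.List.pyGet? arr mxi with
  | some a, some b => PySem.List.pySetD (PySem.List.pySetD arr mxi a) mni b
  | _, _ => arr

-- the body of A's `for i, v in enumerate(arr)` loop
def pvStepA (st : Int × Int × Int × Int) (p : Int × List Int) : Int × Int × Int × Int :=
  let nw := pvSumNeg p.2
  let mx := if nw > st.1 then (nw, p.1) else (st.1, st.2.1)
  let mn := if nw < st.2.2.1 then (nw, p.1) else (st.2.2.1, st.2.2.2)
  (mx.1, mx.2, mn.1, mn.2)

def under_zero_min_max_strings_swap (arr : List (List Int)) : List (List Int) :=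
  match PySem.List.pyGet? arr 0 with
  | none => arr   -- Python raises IndexError at `arr[0]`; excluded by Pre_
  | some row0 =>
    let m0 := pvSumNeg row0
    let st := (PySem.List.enumerate arr 0).foldl pvStepA (m0, 0, m0, 0)
    pvSwap arr st.2.1 st.2.2.2

-- ===== PORT B =====
def under_zero_min_max_strings_swap_alt (arr : List (List Int)) : List (List Int) :=
  let sums := arr.map pvSumNeg
  match PySem.List.max? sums (fun x => x), PySem.List.min? sums (fun x => x) with
  | some mx, some mn =>   -- `max(sums)` / `min(sums)`; none = ValueError on empty arr, excluded by Pre_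
    match PySem.List.index? sums mx, PySem.List.index? sums mn with
    | some mxi, some mni => pvSwap arr (mxi : Int) (mni : Int)
    | _, _ => arr   -- unreachable: max/min of sums is a member of sums
  | _, _ => arr

-- ===== PRECONDITION & SPEC =====
-- Pre_ excludes only the empty list, on which A raises IndexError (and B ValueError).
def Pre_under_zero_min_max_strings_swap (arr : List (List Int)) : Prop := arr ≠ []
instance (arr : List (List Int)) : Decidable (Pre_under_zero_min_max_strings_swap arr) := by unfold Pre_under_zero_min_max_strings_swap; infer_instance
def pvWitness_under_zero_min_max_strings_swap : List (List Int) := [[1, -2], [-3], [0]]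

def Spec_under_zero_min_max_strings_swap (arr : List (List Int)) (out : List (List Int)) : Prop := out = under_zero_min_max_strings_swap_alt arr
instance (arr : List (List Int)) (out : List (List Int)) : Decidable (Spec_under_zero_min_max_strings_swap arr out) := by unfold Spec_under_zero_min_max_strings_swap; infer_instance

-- ===== CLAIM (what is proved, stated in full; the proofs are below) =====
def Claim_equal_under_zero_min_max_strings_swap : Prop := ∀ (arr : List (List Int)), Dom_under_zero_min_max_strings_swap arr → Pre_under_zero_min_max_strings_swap arr → Spec_under_zero_min_max_strings_swap arr (under_zero_min_max_strings_swap arr)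

-- ===== LEMMAS AND PROOFS =====

-- proof-only helpers: the two independent halves of A's loop body, acting on (value, index) pairs
def stepMax (st : Int × Int) (p : Int × Int) : Int × Int := if p.2 > st.1 then (p.2, p.1) else st
def stepMin (st : Int × Int) (p : Int × Int) : Int × Int := if p.2 < st.1 then (p.2, p.1) else st

lemma enumerate_map (f : List Int → Int) : ∀ (l : List (List Int)) (j : Int),
    PySem.List.enumerate (l.map f) j = (PySem.List.enumerate l j).map (fun p => (p.1, f p.2)) := by
  intro l
  induction l with
  | nil => intro j; simp [PySem.List.enumerate_nil]
  | cons x t ih => intro j; simp [PySem.List.enumerate_cons, ih]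

lemma foldA_split : ∀ (l : List (Int × List Int)) (mx mxi mn mni : Int),
    l.foldl pvStepA (mx, mxi, mn, mni)
      = (((l.map (fun p => (p.1, pvSumNeg p.2))).foldl stepMax (mx, mxi)).1,
         ((l.map (fun p => (p.1, pvSumNeg p.2))).foldl stepMax (mx, mxi)).2,
         ((l.map (fun p => (p.1, pvSumNeg p.2))).foldl stepMin (mn, mni)).1,
         ((l.map (fun p => (p.1, pvSumNeg p.2))).foldl stepMin (mn, mni)).2) := by
  intro l
  induction l with
  | nil => intro mx mxi mn mni; rfl
  | cons p t ih =>
    intro mx mxi mn mni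
    simp only [List.map_cons, List.foldl_cons, pvStepA, stepMax, stepMin]
    split_ifs <;> simp [ih]

lemma foldl_min_le (t : List Int) : ∀ a : Int, List.foldl min a t ≤ a := by
  induction t with
  | nil => intro a; simp
  | cons x s ih =>
    intro a
    calc List.foldl min a (x :: s) = List.foldl min (min a x) s := by simp
    _ ≤ min a x := ih _
    _ ≤ a := min_le_left _ _

lemma foldMax_spec : ∀ (s : List Int) (j mx mxi : Int),
    (PySem.List.enumerate s j).foldl stepMax (mx, mxi)
      = (s.foldl max mx, if mx < s.foldl max mx then j + (List.idxOf (s.foldl max mx) s : Int) else mxi) := by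
  intro s
  induction s with
  | nil => intro j mx mxi; simp [PySem.List.enumerate_nil]
  | cons x t ih =>
    intro j mx mxi
    rw [PySem.List.enumerate_cons, List.foldl_cons]
    by_cases hx : mx < x
    · have hstep : stepMax (mx, mxi) (j, x) = (x, j) := by simp [stepMax, hx]
      rw [hstep, ih]
      have hmx : List.foldl max mx (x :: t) = List.foldl max x t := by
        simp [List.foldl_cons, max_eq_right (le_of_lt hx)]
      have hxle : x ≤ List.foldl max x t := (PySem.List.le_foldl_max t x).1
      rw [hmx]
      by_cases h2 : x < List.foldl max x t
      · have hne : x ≠ List.foldl max x t := ne_of_lt h2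
        rw [if_pos h2, if_pos (lt_of_lt_of_le hx hxle), List.idxOf_cons_ne _ hne]
        simp [Nat.succ_eq_add_one]
        ring
      · have hxeq : List.foldl max x t = x := le_antisymm (not_lt.mp h2) hxle
        rw [if_neg h2, if_pos (lt_of_lt_of_le hx hxle), hxeq, List.idxOf_cons_self]
        simp
    · have hstep : stepMax (mx, mxi) (j, x) = (mx, mxi) := by simp [stepMax, hx]
      rw [hstep, ih]
      have hmx : List.foldl max mx (x :: t) = List.foldl max mx t := by
        simp [List.foldl_cons, max_eq_left (not_lt.mp hx)]
      rw [hmx]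
      by_cases h2 : mx < List.foldl max mx t
      · have hne : x ≠ List.foldl max mx t := ne_of_lt (lt_of_le_of_lt (not_lt.mp hx) h2)
        rw [if_pos h2, if_pos h2, List.idxOf_cons_ne _ hne]
        simp [Nat.succ_eq_add_one]
        ring
      · rw [if_neg h2, if_neg h2]

lemma foldMin_spec : ∀ (s : List Int) (j mn mni : Int),
    (PySem.List.enumerate s j).foldl stepMin (mn, mni)
      = (s.foldl min mn, if s.foldl min mn < mn then j + (List.idxOf (s.foldl min mn) s : Int) else mni) := by
  intro s
  induction s with
  | nil => intro j mn mni; simp [PySem.List.enumerate_nil]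
  | cons x t ih =>
    intro j mn mni
    rw [PySem.List.enumerate_cons, List.foldl_cons]
    by_cases hx : x < mn
    · have hstep : stepMin (mn, mni) (j, x) = (x, j) := by simp [stepMin, hx]
      rw [hstep, ih]
      have hmn : List.foldl min mn (x :: t) = List.foldl min x t := by
        simp [List.foldl_cons, min_eq_right (le_of_lt hx)]
      have hxle : List.foldl min x t ≤ x := foldl_min_le t x
      rw [hmn]
      by_cases h2 : List.foldl min x t < x
      · have hne : x ≠ List.foldl min x t := ne_of_gt h2
        rw [if_pos h2, if_pos (lt_of_le_of_lt hxle hx), List.idxOf_cons_ne _ hne]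
        simp [Nat.succ_eq_add_one]
        ring
      · have hxeq : List.foldl min x t = x := le_antisymm hxle (not_lt.mp h2)
        rw [if_neg h2, if_pos (lt_of_le_of_lt hxle hx), hxeq, List.idxOf_cons_self]
        simp
    · have hstep : stepMin (mn, mni) (j, x) = (mn, mni) := by simp [stepMin, hx]
      rw [hstep, ih]
      have hmn : List.foldl min mn (x :: t) = List.foldl min mn t := by
        simp [List.foldl_cons, min_eq_left (not_lt.mp hx)]
      rw [hmn]
      by_cases h2 : List.foldl min mn t < mn
      · have hne : x ≠ List.foldl min mn t := ne_of_gt (lt_of_lt_of_le h2 (not_lt.mp hx))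
        rw [if_pos h2, if_pos h2, List.idxOf_cons_ne _ hne]
        simp [Nat.succ_eq_add_one]
        ring
      · rw [if_neg h2, if_neg h2]

lemma index?_of_mem {α : Type} [BEq α] [LawfulBEq α] (xs : List α) (v : α) (h : v ∈ xs) :
    PySem.List.index? xs v = some (List.idxOf v xs) := by
  induction xs with
  | nil => cases h
  | cons x t ih =>
    by_cases hx : x = v
    · subst hx; rw [PySem.List.index?_cons_self, List.idxOf_cons_self]
    · have hv : v ∈ t := by cases h with
        | head => exact absurd rfl hx
        | tail _ h' => exact h'
      rw [PySem.List.index?_cons_of_ne _ hx, ih hv, List.idxOf_cons_ne _ hx]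
      simp [Nat.succ_eq_add_one]

-- ===== VERDICT (by name: the statement is the Claim_ definition above) =====
theorem under_zero_min_max_strings_swap_spec : Claim_equal_under_zero_min_max_strings_swap := by
  intro arr _hdom hpre
  obtain ⟨r, rest, rfl⟩ := List.exists_cons_of_ne_nil hpre
  show under_zero_min_max_strings_swap (r :: rest) = under_zero_min_max_strings_swap_alt (r :: rest)
  have hMmem : List.foldl max (pvSumNeg r) (rest.map pvSumNeg) ∈ pvSumNeg r :: rest.map pvSumNeg :=
    PySem.List.max?_mem (PySem.List.max?_id_cons (pvSumNeg r) (rest.map pvSumNeg))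
  have hmmem : List.foldl min (pvSumNeg r) (rest.map pvSumNeg) ∈ pvSumNeg r :: rest.map pvSumNeg :=
    PySem.List.min?_mem (PySem.List.min?_id_cons (pvSumNeg r) (rest.map pvSumNeg))
  have hget : PySem.List.pyGet? (r :: rest) 0 = some r := by simp
  have henum : (PySem.List.enumerate (r :: rest) 0).map (fun p => (p.1, pvSumNeg p.2))
      = PySem.List.enumerate (pvSumNeg r :: rest.map pvSumNeg) 0 := by
    have := enumerate_map pvSumNeg (r :: rest) 0
    simpa using this.symm
  have hfold : List.foldl max (pvSumNeg r) (pvSumNeg r :: rest.map pvSumNeg)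
      = List.foldl max (pvSumNeg r) (rest.map pvSumNeg) := by
    simp [List.foldl_cons]
  have hfoldn : List.foldl min (pvSumNeg r) (pvSumNeg r :: rest.map pvSumNeg)
      = List.foldl min (pvSumNeg r) (rest.map pvSumNeg) := by
    simp [List.foldl_cons]
  have hs0le : pvSumNeg r ≤ List.foldl max (pvSumNeg r) (rest.map pvSumNeg) :=
    (PySem.List.le_foldl_max (rest.map pvSumNeg) (pvSumNeg r)).1
  have hles0 : List.foldl min (pvSumNeg r) (rest.map pvSumNeg) ≤ pvSumNeg r :=
    foldl_min_le (rest.map pvSumNeg) (pvSumNeg r)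
  have hmaxidx : (if pvSumNeg r < List.foldl max (pvSumNeg r) (rest.map pvSumNeg)
        then (0:Int) + ↑(List.idxOf (List.foldl max (pvSumNeg r) (rest.map pvSumNeg)) (pvSumNeg r :: rest.map pvSumNeg))
        else 0)
      = ↑(List.idxOf (List.foldl max (pvSumNeg r) (rest.map pvSumNeg)) (pvSumNeg r :: rest.map pvSumNeg)) := by
    by_cases h : pvSumNeg r < List.foldl max (pvSumNeg r) (rest.map pvSumNeg)
    · simp [h]
    · have he : List.foldl max (pvSumNeg r) (rest.map pvSumNeg) = pvSumNeg r :=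
        le_antisymm (not_lt.mp h) hs0le
      simp [he, List.idxOf_cons_self]
  have hminidx : (if List.foldl min (pvSumNeg r) (rest.map pvSumNeg) < pvSumNeg r
        then (0:Int) + ↑(List.idxOf (List.foldl min (pvSumNeg r) (rest.map pvSumNeg)) (pvSumNeg r :: rest.map pvSumNeg))
        else 0)
      = ↑(List.idxOf (List.foldl min (pvSumNeg r) (rest.map pvSumNeg)) (pvSumNeg r :: rest.map pvSumNeg)) := by
    by_cases h : List.foldl min (pvSumNeg r) (rest.map pvSumNeg) < pvSumNeg r
    · simp [h]
    · have he : List.foldl min (pvSumNeg r) (rest.map pvSumNeg) = pvSumNeg r :=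
        le_antisymm hles0 (not_lt.mp h)
      simp [he, List.idxOf_cons_self]
  rw [under_zero_min_max_strings_swap, under_zero_min_max_strings_swap_alt, hget]
  simp only [List.map_cons, PySem.List.max?_id_cons, PySem.List.min?_id_cons,
    index?_of_mem _ _ hMmem, index?_of_mem _ _ hmmem]
  rw [foldA_split, henum, foldMax_spec, foldMin_spec, hfold, hfoldn, hmaxidx, hminidx]
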